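-- pv_equiv track=rewrite | github.com/przemekjoniec/matura | Matury/Matura Maj 2023/Zadanie 3.py | nieparzysty_skrot
-- ===== SOURCE A (Python) =====
-- def nieparzysty_skrot(n):
--     m = 0
--     p = 1
--     while n > 0:
--         cyfra = n % 10
--         if cyfra % 2 != 0:
--             m = m + cyfra * p
--             p = p * 10
--         n = n // 10
--     return m
-- ===== SOURCE B (Python) =====
-- def nieparzysty_skrot(n):
--     if n <= 0:
--         return 0
--     m = 0
--     for c in str(n):
--         if c in '13579':
--             m = 10 * m + ord(c) - 48
--     return m
-- ===== Notes on version B (the rewrite author's own statement) =====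
-- stated objective: idiomatic
-- what changed: Replaces A's LSB-first modular digit-extraction loop with positional accumulator p by an MSB-first pass over str(n) that keeps odd digit characters and folds them positionally into a single accumulator.
import Mathlib
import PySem

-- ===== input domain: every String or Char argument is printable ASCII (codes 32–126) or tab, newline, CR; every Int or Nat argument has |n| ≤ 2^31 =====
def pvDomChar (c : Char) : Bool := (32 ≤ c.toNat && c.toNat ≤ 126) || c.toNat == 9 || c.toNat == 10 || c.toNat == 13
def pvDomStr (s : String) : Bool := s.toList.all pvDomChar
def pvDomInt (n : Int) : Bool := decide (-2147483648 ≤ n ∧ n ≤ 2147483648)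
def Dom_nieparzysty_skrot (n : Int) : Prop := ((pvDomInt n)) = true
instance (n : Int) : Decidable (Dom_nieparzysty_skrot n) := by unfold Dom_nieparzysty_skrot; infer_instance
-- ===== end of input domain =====

-- B replaces A's LSB-first modular digit loop (positional accumulator p) by an MSB-first
-- fold over str(n) keeping the odd digit characters; same values, similar cost.


-- ===== PORT A =====
-- the while-loop of A, state (n, m, p)
def nieparzystyLoopA (n m p : Int) : Int :=
  if h : n > 0 then
    let cyfra := PySem.Int.mod n 10
    if PySem.Int.mod cyfra 2 ≠ 0 then
      nieparzystyLoopA (PySem.Int.floordiv n 10) (m + cyfra * p) (p * 10)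
    else
      nieparzystyLoopA (PySem.Int.floordiv n 10) m p
  else m
termination_by n.toNat
decreasing_by
  all_goals
    rw [PySem.Int.floordiv_eq_ediv_of_pos (by omega)]
    omega

def nieparzysty_skrot (n : Int) : Int := nieparzystyLoopA n 0 1

-- ===== PORT B =====
-- `c in '13579'` for a single character c is membership in the character list (exact here)
def nieparzysty_skrot_alt (n : Int) : Int :=
  if n ≤ 0 then 0
  else
    (PySem.Int.toChars n).foldl
      (fun m c => if c ∈ ['1', '3', '5', '7', '9'] then 10 * m + ((c.toNat : Int) - 48) else m) 0

-- ===== PRECONDITION & SPEC =====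
def Spec_nieparzysty_skrot (n : Int) (out : Int) : Prop := out = nieparzysty_skrot_alt n
instance (n : Int) (out : Int) : Decidable (Spec_nieparzysty_skrot n out) := by unfold Spec_nieparzysty_skrot; infer_instance

-- ===== CLAIM (what is proved, stated in full; the proofs are below) =====
def Claim_equal_nieparzysty_skrot : Prop := ∀ (n : Int), Dom_nieparzysty_skrot n → Spec_nieparzysty_skrot n (nieparzysty_skrot n)

-- ===== LEMMAS AND PROOFS =====

-- the common value: odd digits of N (LSB-first list) read positionally
def oddVal (N : Nat) : Int :=
  (Nat.ofDigits 10 ((Nat.digits 10 N).filter (fun d => d % 2 = 1)) : Nat)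

-- A-side: the loop computes m + p * oddVal
lemma loopA_eq (N : Nat) : ∀ m p : Int,
    nieparzystyLoopA (N : Int) m p = m + p * oddVal N := by
  induction N using Nat.strong_induction_on with
  | _ N ih =>
    intro m p
    rcases Nat.eq_zero_or_pos N with h0 | hpos
    · subst h0
      rw [nieparzystyLoopA]
      simp [oddVal]
    · have hgt : (N : Int) > 0 := by exact_mod_cast hpos
      have hmod : PySem.Int.mod (N : Int) 10 = ((N % 10 : Nat) : Int) :=
        PySem.Int.mod_natCast N 10
      have hdiv : PySem.Int.floordiv (N : Int) 10 = ((N / 10 : Nat) : Int) :=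
        PySem.Int.floordiv_natCast N 10
      have hdlt : N / 10 < N := Nat.div_lt_self hpos (by norm_num)
      have hdig := Nat.digits_def' (b := 10) (by norm_num) hpos
      have hmod2 : PySem.Int.mod (PySem.Int.mod ((N : Int)) 10) 2 = ((N % 10 % 2 : Nat) : Int) := by
        rw [hmod]; exact_mod_cast PySem.Int.mod_natCast (N % 10) 2
      rw [nieparzystyLoopA, dif_pos hgt]
      by_cases hodd : N % 10 % 2 = 1
      · rw [if_pos (by rw [hmod2]; omega), hmod, hdiv, ih (N / 10) hdlt]
        unfold oddVal
        rw [hdig, List.filter_cons_of_pos (by simpa using hodd), Nat.ofDigits_cons]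
        push_cast
        ring
      · rw [if_neg (by rw [hmod2]; omega), hdiv, ih (N / 10) hdlt]
        unfold oddVal
        rw [hdig, List.filter_cons_of_neg (by simpa using hodd)]

-- digit characters of a decimal digit d < 10
lemma digitChar_mem_odd (d : Nat) (hd : d < 10) :
    (Nat.digitChar d ∈ ['1', '3', '5', '7', '9']) ↔ d % 2 = 1 := by
  interval_cases d <;> decide

lemma digitChar_toNat (d : Nat) (hd : d < 10) : (Nat.digitChar d).toNat = d + 48 := by
  interval_cases d <;> decide

-- Nat.toDigits via Nat.digits (positive n)
lemma toDigitsCore_eq (f : Nat) : ∀ (n : Nat) (acc : List Char), 0 < n → n < f →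
    Nat.toDigitsCore 10 f n acc = ((Nat.digits 10 n).map Nat.digitChar).reverse ++ acc := by
  induction f with
  | zero => intro n acc h1 h2; omega
  | succ f ih =>
    intro n acc h1 h2
    rw [Nat.toDigitsCore]
    have hdig := Nat.digits_def' (b := 10) (by norm_num) h1
    by_cases hz : n / 10 = 0
    · rw [if_pos hz, hdig, hz]
      simp
    · rw [if_neg hz]
      rw [ih (n / 10) _ (Nat.pos_of_ne_zero hz)
        (by have := Nat.div_lt_self h1 (by norm_num : (1:Nat) < 10); omega)]
      rw [hdig]
      simp

lemma toDigits_eq (n : Nat) (h : 0 < n) :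
    Nat.toDigits 10 n = ((Nat.digits 10 n).map Nat.digitChar).reverse := by
  rw [Nat.toDigits, toDigitsCore_eq (n + 1) n [] h (by omega)]
  simp

-- B-side: the MSB-first char fold over the digit string computes oddVal
lemma foldr_digits (ds : List Nat) (hlt : ∀ d ∈ ds, d < 10) :
    List.foldr
      (fun d (m : Int) =>
        if Nat.digitChar d ∈ ['1', '3', '5', '7', '9']
        then 10 * m + (((Nat.digitChar d).toNat : Int) - 48) else m) 0 ds
      = (Nat.ofDigits 10 (ds.filter (fun d => d % 2 = 1)) : Nat) := by
  induction ds with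
  | nil => simp
  | cons d tl ih =>
    have hd : d < 10 := hlt d (List.mem_cons_self ..)
    have htl : ∀ x ∈ tl, x < 10 := fun x hx => hlt x (List.mem_cons_of_mem _ hx)
    simp only [List.foldr_cons, ih htl]
    by_cases hodd : d % 2 = 1
    · rw [if_pos ((digitChar_mem_odd d hd).mpr hodd)]
      rw [List.filter_cons_of_pos (by simpa using hodd)]
      rw [digitChar_toNat d hd, Nat.ofDigits_cons]
      push_cast
      ring
    · rw [if_neg (fun hmem => hodd ((digitChar_mem_odd d hd).mp hmem))]
      rw [List.filter_cons_of_neg (by simpa using hodd)]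

lemma alt_eq (N : Nat) (h : 0 < N) : nieparzysty_skrot_alt (N : Int) = oddVal N := by
  unfold nieparzysty_skrot_alt
  rw [if_neg (by omega)]
  have htoChars : PySem.Int.toChars (N : Int) = Nat.toDigits 10 N := by
    unfold PySem.Int.toChars
    rw [if_neg (by omega)]
    simp
  rw [htoChars, toDigits_eq N h, List.foldl_reverse, List.foldr_map]
  rw [foldr_digits (Nat.digits 10 N) (fun d hd => Nat.digits_lt_base (by norm_num) hd)]
  rfl

-- ===== VERDICT (by name: the statement is the Claim_ definition above) =====
theorem nieparzysty_skrot_spec : Claim_equal_nieparzysty_skrot := by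
  intro n _
  unfold Spec_nieparzysty_skrot nieparzysty_skrot
  by_cases hpos : 0 < n
  · have hN : n = ((n.toNat : Nat) : Int) := (Int.toNat_of_nonneg (le_of_lt hpos)).symm
    rw [hN, loopA_eq, alt_eq n.toNat (by omega)]
    ring
  · rw [nieparzystyLoopA, dif_neg (by omega)]
    unfold nieparzysty_skrot_alt
    rw [if_pos (by omega)]
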